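-- pv_equiv track=rewrite | github.com/Durgaprasad-kakarla/Geeks-for-Geeks | Difficulty: Medium/Balancing Consonants and Vowels Ratio/balancing-consonants-and-vowels-ratio.py | countBalanced
-- ===== SOURCE A (Python) =====
-- from collections import defaultdict
--
-- def countBalanced(arr):
--     vowels = set("aeiou")
--     prefix_balances = defaultdict(int, {0: 1})
--     curr_balance = count = 0
--     for word in arr:
--         curr_balance += len(word) - 2 * sum(c in vowels for c in word)
--         count += prefix_balances[curr_balance]
--         prefix_balances[curr_balance] += 1
--     return count
-- ===== SOURCE B (Python) =====
-- def countBalanced(arr):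
--     vowels = set("aeiou")
--     balances = [0]
--     bal = 0
--     for word in arr:
--         bal += len(word) - 2 * sum(c in vowels for c in word)
--         balances.append(bal)
--     counter = {}
--     for b in balances:
--         counter[b] = counter.get(b, 0) + 1
--     return sum(k * (k - 1) // 2 for k in counter.values())
-- ===== Notes on version B (the rewrite author's own statement) =====
-- stated objective: alternative
-- what changed: Instead of accumulating the pair count online inside one loop with a defaultdict, B records all prefix balances (including the empty prefix) in a first pass, groups them with a counter, and computes the answer in closed form as sum of k*(k-1)//2 over the group sizes.
import Mathlib
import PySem

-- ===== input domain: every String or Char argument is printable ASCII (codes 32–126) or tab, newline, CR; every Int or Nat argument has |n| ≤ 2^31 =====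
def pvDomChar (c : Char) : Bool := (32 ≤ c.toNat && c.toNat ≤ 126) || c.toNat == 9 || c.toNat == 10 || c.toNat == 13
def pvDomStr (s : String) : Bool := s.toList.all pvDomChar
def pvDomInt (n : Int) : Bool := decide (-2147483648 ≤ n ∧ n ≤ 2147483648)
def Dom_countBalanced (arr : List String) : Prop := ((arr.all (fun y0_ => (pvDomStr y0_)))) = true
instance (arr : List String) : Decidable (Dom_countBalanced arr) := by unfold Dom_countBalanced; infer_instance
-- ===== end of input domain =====

-- B groups all prefix balances and counts equal pairs in closed form (k*(k-1)//2 per group)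
-- instead of A's online count with a defaultdict; alternative decomposition, same asymptotic cost.

-- ===== PORT A =====
def countBalanced (arr : List String) : Int :=
  let vowels : PySem.Set Char := PySem.Set.ofList "aeiou".toList
  (arr.foldl
    (fun (st : PySem.Dict Int Int × Int × Int) (word : String) =>
      let bal := st.2.1 + (PySem.Str.len word -
        2 * word.toList.foldl (fun s c => s + (if vowels.contains c then 1 else 0)) 0)
      (st.1.insert bal (st.1.getD bal 0 + 1), bal, st.2.2 + st.1.getD bal 0))
    (PySem.Dict.ofList [((0 : Int), (1 : Int))], 0, 0)).2.2

-- ===== PORT B =====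
def countBalanced_alt (arr : List String) : Int :=
  let vowels : PySem.Set Char := PySem.Set.ofList "aeiou".toList
  let balances := (arr.foldl
    (fun (st : List Int × Int) (word : String) =>
      let bal := st.2 + (PySem.Str.len word -
        2 * word.toList.foldl (fun s c => s + (if vowels.contains c then 1 else 0)) 0)
      (st.1 ++ [bal], bal))
    (([0] : List Int), 0)).1
  let counter := balances.foldl
    (fun (d : PySem.Dict Int Int) b => d.insert b (d.getD b 0 + 1)) PySem.Dict.empty
  (counter.values.map (fun k => PySem.Int.floordiv (k * (k - 1)) 2)).sum

-- ===== PRECONDITION & SPEC =====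
def Spec_countBalanced (arr : List String) (out : Int) : Prop := out = countBalanced_alt arr
instance (arr : List String) (out : Int) : Decidable (Spec_countBalanced arr out) := by unfold Spec_countBalanced; infer_instance

-- ===== CLAIM (what is proved, stated in full; the proofs are below) =====
def Claim_equal_countBalanced : Prop := ∀ (arr : List String), Dom_countBalanced arr → Spec_countBalanced arr (countBalanced arr)

-- ===== LEMMAS AND PROOFS =====

-- C(k,2) as both ports' Python writes it: k*(k-1)//2
def pvC (k : Int) : Int := PySem.Int.floordiv (k * (k - 1)) 2

-- sum of pvC over a dict's values
def pvSumC (d : PySem.Dict Int Int) : Int := (d.values.map pvC).sum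

-- the sequence of prefix balances (after the initial one) produced by delta function g
def pvBals (g : String → Int) (bal : Int) : List String → List Int
  | [] => []
  | w :: ws => (bal + g w) :: pvBals g (bal + g w) ws

lemma pvC_succ (v : Int) : pvC (v + 1) = pvC v + v := by
  unfold pvC
  rw [PySem.Int.floordiv_eq_ediv_of_pos (by norm_num),
      PySem.Int.floordiv_eq_ediv_of_pos (by norm_num)]
  have h : (v + 1) * (v + 1 - 1) = v * (v - 1) + v * 2 := by ring
  rw [h, Int.add_mul_ediv_right _ _ (by norm_num)]

lemma sum_map_update (f : Int → Int) (w : Int) :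
    ∀ (ks : List Int) (k : Int), ks.Nodup → k ∈ ks →
      (ks.map (fun x => if x = k then w else f x)).sum = (ks.map f).sum - f k + w := by
  intro ks
  induction ks with
  | nil => intro k _ hk; simp at hk
  | cons x xs ih =>
    intro k hnd hk
    rcases List.mem_cons.mp hk with h | h
    · subst h
      have hx : ∀ y ∈ xs, ¬ (y = k) := fun y hy he => (List.nodup_cons.mp hnd).1 (he ▸ hy)
      simp only [List.map_cons, List.sum_cons, if_true,
        List.map_congr_left (fun y hy => if_neg (hx y hy))]
      omega
    · have hxk : ¬ (x = k) := fun he => (List.nodup_cons.mp hnd).1 (he ▸ h)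
      simp only [List.map_cons, List.sum_cons, if_neg hxk]
      rw [ih k (List.nodup_cons.mp hnd).2 h]
      ring

lemma sumC_insert (d : PySem.Dict Int Int) (k : Int) (hnd : d.keys.Nodup) :
    pvSumC (d.insert k (d.getD k 0 + 1)) = pvSumC d + d.getD k 0 := by
  by_cases hc : d.contains k = true
  · have hk : k ∈ d.keys := (PySem.Dict.contains_iff_mem_keys d k).mp hc
    have hnd' : (d.insert k (d.getD k 0 + 1)).keys.Nodup := PySem.Dict.nodup_keys_insert d k (d.getD k 0 + 1) hnd
    rw [pvSumC, PySem.Dict.values_eq_map_keys _ hnd' 0,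
        PySem.Dict.keys_insert_of_contains d _ hc, List.map_map]
    have hmap : (d.keys.map (pvC ∘ fun x => (d.insert k (d.getD k 0 + 1)).getD x 0))
        = d.keys.map (fun x => if x = k then pvC (d.getD k 0 + 1) else pvC (d.getD x 0)) := by
      apply List.map_congr_left
      intro x _
      simp only [Function.comp, PySem.Dict.getD_insert]
      by_cases hx : x = k <;> simp [hx]
    rw [hmap, sum_map_update _ _ _ _ hnd hk, pvC_succ]
    rw [pvSumC, PySem.Dict.values_eq_map_keys _ hnd 0, List.map_map]
    simp only [Function.comp_def]
    ring
  · have hc' : d.contains k = false := by simpa using hc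
    rw [pvSumC, pvSumC, PySem.Dict.getD_of_not_contains d 0 hc']
    have : (d.insert k (0 + 1)).values = d.values ++ [0 + 1] := by
      simp only [PySem.Dict.values, PySem.Dict.items_insert_of_not_contains d _ hc', List.map_append]
      rfl
    rw [this]
    simp [pvC, PySem.Int.floordiv]

lemma foldA_eq (g : String → Int) :
    ∀ (l : List String) (d : PySem.Dict Int Int) (bal cnt : Int), d.keys.Nodup →
      (l.foldl
        (fun (st : PySem.Dict Int Int × Int × Int) (word : String) =>
          let b := st.2.1 + g word
          (st.1.insert b (st.1.getD b 0 + 1), b, st.2.2 + st.1.getD b 0))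
        (d, bal, cnt)).2.2
      = cnt + pvSumC ((pvBals g bal l).foldl
          (fun (d : PySem.Dict Int Int) b => d.insert b (d.getD b 0 + 1)) d) - pvSumC d := by
  intro l
  induction l with
  | nil => intro d bal cnt _; simp [pvBals]
  | cons w ws ih =>
    intro d bal cnt hnd
    simp only [List.foldl_cons, pvBals]
    rw [ih _ _ _ (PySem.Dict.nodup_keys_insert d _ _ hnd)]
    rw [sumC_insert d _ hnd]
    ring

lemma foldB_fst (g : String → Int) :
    ∀ (l : List String) (acc : List Int) (bal : Int),
      (l.foldl
        (fun (st : List Int × Int) (word : String) =>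
          let b := st.2 + g word
          (st.1 ++ [b], b))
        (acc, bal)).1 = acc ++ pvBals g bal l := by
  intro l
  induction l with
  | nil => intro acc bal; simp [pvBals]
  | cons w ws ih =>
    intro acc bal
    simp only [List.foldl_cons, pvBals]
    rw [ih]
    simp

-- ===== VERDICT (by name: the statement is the Claim_ definition above) =====
theorem countBalanced_spec : Claim_equal_countBalanced := by
  intro arr _
  show countBalanced arr = countBalanced_alt arr
  simp only [countBalanced, countBalanced_alt]
  set g : String → Int := fun word =>
    PySem.Str.len word -
      2 * word.toList.foldl
        (fun s c => s + (if (PySem.Set.ofList "aeiou".toList).contains c then 1 else 0)) 0 with hg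
  have hA := foldA_eq g arr (PySem.Dict.ofList [((0 : Int), (1 : Int))]) 0 0
    (PySem.Dict.nodup_keys_ofList _)
  have hB := foldB_fst g arr [0] 0
  simp only [hg] at hA hB
  rw [hA, hB]
  have hd0 : PySem.Dict.ofList [((0 : Int), (1 : Int))]
      = (PySem.Dict.empty.insert 0 ((PySem.Dict.empty : PySem.Dict Int Int).getD 0 0 + 1)) := by
    decide
  simp only [List.cons_append, List.nil_append, List.foldl_cons]
  rw [← hd0]
  have hsum0 : pvSumC (PySem.Dict.ofList [((0 : Int), (1 : Int))]) = 0 := by decide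
  rw [hsum0,
    show (fun k : Int => PySem.Int.floordiv (k * (k - 1)) 2) = pvC from rfl]
  simp only [pvSumC]
  omega
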